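-- pv_equiv track=rewrite | github.com/Youjiiin/CodingTest | 프로그래머스/2/42626. 더 맵게/더 맵게.py | solution
-- ===== SOURCE A (Python) =====
-- import heapq
--
-- def solution(scoville, K):
--     count = 0
--     heap = []
--
--     # K이하의 음식들만 큐에 삽입
--     for i in scoville:
--         heapq.heappush(heap, i)
--
--     # 모든 요소가 K이상이 될때까지 진행
--     while heap[0] < K:
--         # 음식 섞기
--         heapq.heappush(heap, heapq.heappop(heap) + (heapq.heappop(heap) * 2))
--         # 카운트 증가
--         count += 1
--
--         if len(heap) == 1 and heap[0] < K:
--             return -1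
--
--     return count
-- ===== SOURCE B (Python) =====
-- def solution(scoville, K):
--     # sorted-list re-implementation: keep the foods in an ascending list,
--     # mix the two front elements and re-insert the mix at the position found
--     # by a binary search
--     lst = sorted(scoville)
--     count = 0
--     while lst[0] < K:
--         a = lst.pop(0)
--         b = lst.pop(0)
--         new = a + b * 2
--         lo, hi = 0, len(lst)
--         while lo < hi:
--             mid = (lo + hi) // 2
--             if lst[mid] <= new:
--                 lo = mid + 1
--             else:
--                 hi = mid
--         lst.insert(lo, new)
--         count += 1
--         if len(lst) == 1 and lst[0] < K:
--             return -1
--     return count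
-- ===== Notes on version B (the rewrite author's own statement) =====
-- stated objective: alternative
-- what changed: Replaces the binary heap with an ascending sorted list: pop the two front elements, mix them, and re-insert the mix at the position found by a binary search, instead of heapq push/pop sift operations.
import Mathlib
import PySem

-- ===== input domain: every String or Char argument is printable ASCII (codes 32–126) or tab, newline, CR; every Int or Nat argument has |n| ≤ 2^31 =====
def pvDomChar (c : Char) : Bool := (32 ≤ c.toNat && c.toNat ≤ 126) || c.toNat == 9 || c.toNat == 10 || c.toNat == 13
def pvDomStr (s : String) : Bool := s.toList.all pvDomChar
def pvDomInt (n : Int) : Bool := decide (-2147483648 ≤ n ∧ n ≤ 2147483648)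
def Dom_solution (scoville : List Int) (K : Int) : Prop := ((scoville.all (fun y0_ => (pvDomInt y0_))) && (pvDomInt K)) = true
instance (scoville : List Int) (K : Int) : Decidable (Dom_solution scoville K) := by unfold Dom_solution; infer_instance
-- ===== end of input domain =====

-- B replaces A's binary heap with an ascending sorted list (binary-search re-insertion);
-- equal return values proved on Pre_ (Pre_ excludes exactly the inputs where A raises IndexError).

-- ===== PORT A =====
-- heapq is ported step for step (CPython's array sift operations); pvG h i is heap[i]
-- (indices used are always in range on the paths Python reaches).
def pvG (h : List Int) (i : Nat) : Int := h.getD i 0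

-- heapq._siftdown(heap, 0, pos) with newitem x (bubble the hole at pos up towards the root)
def pvSiftdown (h : List Int) (pos : Nat) (x : Int) : List Int :=
  if 0 < pos then
    if x < pvG h ((pos - 1) / 2) then
      pvSiftdown (h.set pos (pvG h ((pos - 1) / 2))) ((pos - 1) / 2) x
    else h.set pos x
  else h.set pos x
termination_by pos
decreasing_by omega

def pvHeappush (h : List Int) (x : Int) : List Int := pvSiftdown (h ++ [x]) h.length x

-- the while-loop of heapq._siftup (move the smaller child into the hole until a leaf)
def pvSiftupLoop (h : List Int) (pos : Nat) : List Int × Nat :=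
  if 2*pos+1 < h.length then
    if 2*pos+2 < h.length ∧ ¬ (pvG h (2*pos+1) < pvG h (2*pos+2)) then
      pvSiftupLoop (h.set pos (pvG h (2*pos+2))) (2*pos+2)
    else
      pvSiftupLoop (h.set pos (pvG h (2*pos+1))) (2*pos+1)
  else (h, pos)
termination_by h.length - pos
decreasing_by all_goals simp only [List.length_set]; omega

-- heapq._siftup(heap, 0) where heap[0] = x has just been overwritten with the last element
def pvSiftup (h : List Int) (x : Int) : List Int :=
  let r := pvSiftupLoop h 0
  pvSiftdown r.1 r.2 x

-- heapq.heappop (on [] Python raises IndexError; that input is outside Pre_)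
def pvHeappop (h : List Int) : Int × List Int :=
  let lastelt := pvG h (h.length - 1)
  let h' := h.dropLast
  if h' = [] then (lastelt, h')
  else
    let ret := pvG h' 0
    (ret, pvSiftup (h'.set 0 lastelt) lastelt)

-- A's while-loop; the fuel (length+1) is only a termination bound, never exhausted on Pre_
def pvLoopA (K : Int) : Nat → List Int → Int → Int
  | 0, _, _ => 0
  | fuel+1, heap, count =>
    if pvG heap 0 < K then
      let p1 := pvHeappop heap
      let p2 := pvHeappop p1.2
      let h3 := pvHeappush p2.2 (p1.1 + p2.1 * 2)
      if h3.length = 1 ∧ pvG h3 0 < K then -1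
      else pvLoopA K fuel h3 (count + 1)
    else count

def solution (scoville : List Int) (K : Int) : Int :=
  pvLoopA K (scoville.length + 1) (scoville.foldl pvHeappush []) 0

-- ===== PORT B =====
-- Source B's binary search: the lo/hi loop (lo, hi ≥ 0, so `//` is Nat division exactly)
def pvBisect (l : List Int) (x : Int) (lo hi : Nat) : Nat :=
  if lo < hi then
    if l.getD ((lo + hi) / 2) 0 ≤ x then pvBisect l x ((lo + hi) / 2 + 1) hi
    else pvBisect l x lo ((lo + hi) / 2)
  else lo
termination_by hi - lo
decreasing_by all_goals omega

-- B's while-loop (same fuel bound; the inner `2 ≤ length` guard is Python's IndexError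
-- on the two pop(0) calls, outside Pre_)
def pvLoopB (K : Int) : Nat → List Int → Int → Int
  | 0, _, _ => 0
  | fuel+1, lst, count =>
    if lst.getD 0 0 < K then
      if 2 ≤ lst.length then
        let nw := lst.getD 0 0 + lst.getD 1 0 * 2
        let lo := pvBisect (lst.drop 2) nw 0 (lst.drop 2).length
        let lst' := PySem.List.insert (lst.drop 2) (lo : Int) nw
        if lst'.length = 1 ∧ lst'.getD 0 0 < K then -1
        else pvLoopB K fuel lst' (count + 1)
      else 0
    else count

def solution_alt (scoville : List Int) (K : Int) : Int :=
  pvLoopB K (scoville.length + 1) (PySem.List.sorted scoville (fun x => x) false) 0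

-- ===== PRECONDITION & SPEC =====
-- Pre_ excludes exactly the inputs on which A raises IndexError: the empty list
-- (heap[0] fails) and a single element below K (the second heappop fails).
def Pre_solution (scoville : List Int) (K : Int) : Prop :=
  scoville ≠ [] ∧ (scoville.length = 1 → K ≤ scoville.getD 0 0)
instance (scoville : List Int) (K : Int) : Decidable (Pre_solution scoville K) := by
  unfold Pre_solution; infer_instance

def pvWitness_solution : List Int × Int := ([1, 2, 3, 9, 10, 12], 7)

def Spec_solution (scoville : List Int) (K : Int) (out : Int) : Prop := out = solution_alt scoville K
instance (scoville : List Int) (K : Int) (out : Int) : Decidable (Spec_solution scoville K out) := by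
  unfold Spec_solution; infer_instance

-- ===== CLAIM (what is proved, stated in full; the proofs are below) =====
def Claim_equal_solution : Prop := ∀ (scoville : List Int) (K : Int), Dom_solution scoville K → Pre_solution scoville K → Spec_solution scoville K (solution scoville K)

-- ===== LEMMAS AND PROOFS =====

theorem pvG_set_self (h : List Int) (i : Nat) (v : Int) (hi : i < h.length) :
    pvG (h.set i v) i = v := by
  simp [pvG, List.getD_eq_getElem?_getD, hi]

theorem pvG_set_ne (h : List Int) (i j : Nat) (v : Int) (hij : i ≠ j) :
    pvG (h.set i v) j = pvG h j := by
  simp [pvG, List.getD_eq_getElem?_getD, List.getElem?_set_ne hij]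

theorem pvG_mem (h : List Int) (j : Nat) (hj : j < h.length) : pvG h j ∈ h := by
  have : pvG h j = h[j] := by simp [pvG, List.getD_eq_getElem?_getD, List.getElem?_eq_getElem hj]
  rw [this]; exact List.getElem_mem hj

-- heap order (as heapq maintains it): every non-root entry is ≥ its parent
def PVHeap (h : List Int) : Prop :=
  ∀ j, 0 < j → j < h.length → pvG h ((j-1)/2) ≤ pvG h j

theorem pvHeap_root_le (h : List Int) (hh : PVHeap h) :
    ∀ j, j < h.length → pvG h 0 ≤ pvG h j := by
  intro j
  induction j using Nat.strong_induction_on with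
  | _ j ih =>
    intro hj
    rcases Nat.eq_zero_or_pos j with rfl | hpos
    · exact le_refl _
    · exact le_trans (ih ((j-1)/2) (by omega) (by omega)) (hh j hpos hj)

theorem pv_count_set (l : List Int) (i : Nat) (b a : Int) (hi : i < l.length) :
    (l.set i b).count a + (if l.getD i 0 = a then 1 else 0)
      = l.count a + (if b = a then 1 else 0) := by
  induction l generalizing i with
  | nil => simp at hi
  | cons hd tl ih =>
    cases i with
    | zero => simp [List.count_cons]; split_ifs <;> omega
    | succ n =>
      have := ih n (by simpa using hi)
      simp only [List.set_cons_succ, List.count_cons, List.getD_cons_succ]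
      split_ifs at this ⊢ <;> omega

theorem pv_set_set_perm (h : List Int) (i j : Nat) (y : Int)
    (hij : i ≠ j) (hi : i < h.length) (hj : j < h.length) :
    ((h.set i (pvG h j)).set j y).Perm (h.set i y) := by
  rw [List.perm_iff_count]
  intro a
  have h1 := pv_count_set (h.set i (pvG h j)) j y a (by simpa using hj)
  have h2 := pv_count_set h i (pvG h j) a hi
  have h3 := pv_count_set h i y a hi
  have h4 : (h.set i (pvG h j)).getD j 0 = pvG h j := pvG_set_ne h i j _ hij
  rw [h4] at h1
  split_ifs at h1 h2 h3 <;> omega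

theorem pv_perm_take_cons_drop (l : List Int) (p : Nat) (x : Int) :
    (l.take p ++ x :: l.drop p).Perm (x :: l) := by
  have h1 : (l.take p ++ x :: l.drop p).Perm (x :: (l.drop p ++ l.take p)) :=
    List.perm_append_comm (l₁ := l.take p) (l₂ := x :: l.drop p)
  exact h1.trans ((List.perm_append_comm.trans (by rw [List.take_append_drop])).cons x)

-- invariant of heapq._siftdown: heap order holds away from the hole `pos`, the hole's
-- children dominate both the new item and the hole's parent
def PVQ (h : List Int) (pos : Nat) (x : Int) : Prop :=
  pos < h.length ∧
  (∀ j, 0 < j → j < h.length → j ≠ pos → (j-1)/2 ≠ pos → pvG h ((j-1)/2) ≤ pvG h j) ∧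
  (∀ c, 0 < c → c < h.length → (c-1)/2 = pos →
      x ≤ pvG h c ∧ (0 < pos → pvG h ((pos-1)/2) ≤ pvG h c))

theorem pvQ_terminal (h : List Int) (pos : Nat) (x : Int) (hq : PVQ h pos x)
    (hexit : 0 < pos → pvG h ((pos-1)/2) ≤ x) : PVHeap (h.set pos x) := by
  obtain ⟨hlen, hQ2, hQ3⟩ := hq
  intro j hj0 hjlen
  rw [List.length_set] at hjlen
  by_cases hjp : j = pos
  · subst hjp
    rw [pvG_set_ne h j ((j-1)/2) x (by omega), pvG_set_self h j x hlen]
    exact hexit hj0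
  · by_cases hpj : (j-1)/2 = pos
    · rw [hpj, pvG_set_self h pos x hlen, pvG_set_ne h pos j x (Ne.symm hjp)]
      exact (hQ3 j hj0 hjlen hpj).1
    · rw [pvG_set_ne h pos ((j-1)/2) x (fun e => hpj e.symm),
        pvG_set_ne h pos j x (Ne.symm hjp)]
      exact hQ2 j hj0 hjlen hjp hpj

theorem pvQ_step (h : List Int) (pos : Nat) (x : Int) (hq : PVQ h pos x)
    (hp0 : 0 < pos) (hlt : x < pvG h ((pos-1)/2)) :
    PVQ (h.set pos (pvG h ((pos-1)/2))) ((pos-1)/2) x := by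
  obtain ⟨hlen, hQ2, hQ3⟩ := hq
  have hppos : (pos-1)/2 < pos := by omega
  have hplen : (pos-1)/2 < h.length := by omega
  refine ⟨by simpa using hplen, ?_, ?_⟩
  · intro j hj0 hjlen hjpar hpjpar
    rw [List.length_set] at hjlen
    have hjpos : j ≠ pos := by omega
    rw [pvG_set_ne h pos j _ (Ne.symm hjpos)]
    by_cases hpj : (j-1)/2 = pos
    · rw [hpj, pvG_set_self h pos _ hlen]
      exact (hQ3 j hj0 hjlen hpj).2 hp0
    · rw [pvG_set_ne h pos ((j-1)/2) _ (fun e => hpj e.symm)]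
      exact hQ2 j hj0 hjlen hjpos hpj
  · intro c hc0 hclen hcpar
    rw [List.length_set] at hclen
    constructor
    · by_cases hcp : c = pos
      · subst hcp; rw [pvG_set_self h c _ hlen]; exact le_of_lt hlt
      · rw [pvG_set_ne h pos c _ (Ne.symm hcp)]
        have := hQ2 c hc0 hclen hcp (by omega)
        rw [hcpar] at this
        exact le_trans (le_of_lt hlt) this
    · intro hpp0
      have hgp2 : ((pos-1)/2 - 1)/2 ≠ pos := by omega
      rw [pvG_set_ne h pos (((pos-1)/2 - 1)/2) _ (fun e => hgp2 e.symm)]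
      have hA : pvG h (((pos-1)/2 - 1)/2) ≤ pvG h ((pos-1)/2) :=
        hQ2 ((pos-1)/2) hpp0 hplen (by omega) (by omega)
      by_cases hcp : c = pos
      · subst hcp; rw [pvG_set_self h c _ hlen]; exact hA
      · rw [pvG_set_ne h pos c _ (Ne.symm hcp)]
        have hB := hQ2 c hc0 hclen hcp (by omega)
        rw [hcpar] at hB
        exact le_trans hA hB

theorem pvSiftdown_spec (h : List Int) (pos : Nat) (x : Int) (hq : PVQ h pos x) :
    PVHeap (pvSiftdown h pos x) ∧ (pvSiftdown h pos x).Perm (h.set pos x) ∧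
      (pvSiftdown h pos x).length = h.length := by
  induction pos using Nat.strong_induction_on generalizing h with
  | _ pos ih =>
    rw [pvSiftdown]
    by_cases hp0 : 0 < pos
    · rw [if_pos hp0]
      by_cases hlt : x < pvG h ((pos - 1) / 2)
      · rw [if_pos hlt]
        obtain ⟨H1, H2, H3⟩ := ih ((pos-1)/2) (by omega) _ (pvQ_step h pos x hq hp0 hlt)
        have hln := hq.1
        refine ⟨H1, H2.trans (pv_set_set_perm h pos ((pos-1)/2) x (by omega) hln (by omega)), ?_⟩
        rw [H3, List.length_set]
      · rw [if_neg hlt]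
        exact ⟨pvQ_terminal h pos x hq (fun _ => le_of_not_gt hlt), List.Perm.refl _,
          List.length_set ..⟩
    · rw [if_neg hp0]
      exact ⟨pvQ_terminal h pos x hq (fun hc => absurd hc hp0), List.Perm.refl _,
        List.length_set ..⟩

theorem pvG_append (h t : List Int) (j : Nat) (hj : j < h.length) :
    pvG (h ++ t) j = pvG h j := by
  simp [pvG, List.getD_eq_getElem?_getD, List.getElem?_append_left hj]

theorem pv_set_append (h : List Int) (x y : Int) :
    (h ++ [x]).set h.length y = h ++ [y] := by
  induction h with
  | nil => rfl
  | cons a t ih => simp [ih]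

theorem pvHeappush_spec (h : List Int) (x : Int) (hh : PVHeap h) :
    PVHeap (pvHeappush h x) ∧ (pvHeappush h x).Perm (x :: h) ∧
      (pvHeappush h x).length = h.length + 1 := by
  have hq : PVQ (h ++ [x]) h.length x := by
    refine ⟨by simp, ?_, ?_⟩
    · intro j hj0 hjlen hjne hpne
      simp only [List.length_append, List.length_cons, List.length_nil] at hjlen
      have hj : j < h.length := by omega
      rw [pvG_append h [x] j hj, pvG_append h [x] ((j-1)/2) (by omega)]
      exact hh j hj0 hj
    · intro c hc0 hclen hcpar
      exfalso
      simp only [List.length_append, List.length_cons, List.length_nil] at hclen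
      omega
  obtain ⟨H1, H2, H3⟩ := pvSiftdown_spec _ _ _ hq
  rw [pv_set_append] at H2
  refine ⟨H1, H2.trans ?_, by simpa using H3⟩
  have := pv_perm_take_cons_drop h h.length x
  rwa [List.take_length, List.drop_length] at this

-- invariant of the _siftup loop: heap order away from the hole, children of the hole
-- dominate the hole's parent
def PVS (h : List Int) (pos : Nat) : Prop :=
  pos < h.length ∧
  (∀ j, 0 < j → j < h.length → j ≠ pos → (j-1)/2 ≠ pos → pvG h ((j-1)/2) ≤ pvG h j) ∧
  (∀ c, 0 < c → c < h.length → (c-1)/2 = pos → 0 < pos → pvG h ((pos-1)/2) ≤ pvG h c)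

theorem pvS_step (h : List Int) (pos cc : Nat) (hs : PVS h pos)
    (hcc : cc < h.length) (hpc : pos < cc) (hpar : (cc-1)/2 = pos)
    (hmin : ∀ j, 0 < j → j < h.length → (j-1)/2 = pos → pvG h cc ≤ pvG h j) :
    PVS (h.set pos (pvG h cc)) cc := by
  obtain ⟨hplen, hS2, hS3⟩ := hs
  refine ⟨by simpa using hcc, ?_, ?_⟩
  · intro j hj0 hjlen hjcc hpjcc
    rw [List.length_set] at hjlen
    by_cases hjp : j = pos
    · subst hjp
      rw [pvG_set_self h j _ hplen,
        pvG_set_ne h j ((j-1)/2) _ (fun e => absurd e.symm (by omega))]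
      exact hS3 cc (by omega) hcc hpar hj0
    · rw [pvG_set_ne h pos j _ (Ne.symm hjp)]
      by_cases hpj : (j-1)/2 = pos
      · rw [hpj, pvG_set_self h pos _ hplen]
        exact hmin j hj0 hjlen hpj
      · rw [pvG_set_ne h pos ((j-1)/2) _ (fun e => hpj e.symm)]
        exact hS2 j hj0 hjlen hjp hpj
  · intro d hd0 hdlen hdpar _
    rw [List.length_set] at hdlen
    rw [hpar, pvG_set_self h pos _ hplen,
      pvG_set_ne h pos d _ (fun e => absurd e (by omega))]
    have := hS2 d hd0 hdlen (by omega) (by omega)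
    rwa [hdpar] at this

theorem pvSiftupLoop_spec (h : List Int) (pos : Nat) (hs : PVS h pos) :
    PVS (pvSiftupLoop h pos).1 (pvSiftupLoop h pos).2 ∧
      ¬ (2*(pvSiftupLoop h pos).2 + 1 < (pvSiftupLoop h pos).1.length) ∧
      (pvSiftupLoop h pos).1.length = h.length ∧
      (∀ y, ((pvSiftupLoop h pos).1.set (pvSiftupLoop h pos).2 y).Perm (h.set pos y)) := by
  fun_induction pvSiftupLoop h pos with
  | case1 h pos houter hinner ih =>
    obtain ⟨hR, hc2⟩ := hinner
    have hstep : PVS (h.set pos (pvG h (2*pos+2))) (2*pos+2) := by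
      refine pvS_step h pos (2*pos+2) hs hR (by omega) (by omega) ?_
      intro j hj0 hjlen hjpar
      have : j = 2*pos+1 ∨ j = 2*pos+2 := by omega
      rcases this with rfl | rfl
      · exact le_of_not_gt (by simpa using hc2)
      · exact le_refl _
    obtain ⟨H1, H2, H3, H4⟩ := ih hstep
    refine ⟨H1, H2, by rw [H3, List.length_set], ?_⟩
    intro y
    exact (H4 y).trans (pv_set_set_perm h pos (2*pos+2) y (by omega) hs.1 hR)
  | case2 h pos houter hinner ih =>
    have hstep : PVS (h.set pos (pvG h (2*pos+1))) (2*pos+1) := by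
      refine pvS_step h pos (2*pos+1) hs houter (by omega) (by omega) ?_
      intro j hj0 hjlen hjpar
      have : j = 2*pos+1 ∨ j = 2*pos+2 := by omega
      rcases this with rfl | rfl
      · exact le_refl _
      · rcases Classical.not_and_iff_not_or_not.mp hinner with hbad | hlt
        · exact absurd hjlen hbad
        · exact le_of_lt (not_not.mp hlt)
    obtain ⟨H1, H2, H3, H4⟩ := ih hstep
    refine ⟨H1, H2, by rw [H3, List.length_set], ?_⟩
    intro y
    exact (H4 y).trans (pv_set_set_perm h pos (2*pos+1) y (by omega) hs.1 houter)
  | case3 h pos houter =>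
    exact ⟨hs, houter, rfl, fun y => List.Perm.refl _⟩

theorem pvG_dropLast (h : List Int) (j : Nat) (hj : j < h.length - 1) :
    pvG h.dropLast j = pvG h j := by
  rw [pvG, pvG, List.getD_eq_getElem?_getD, List.getD_eq_getElem?_getD,
    List.getElem?_dropLast, if_pos hj]

theorem pvHeappop_spec (h : List Int) (hh : PVHeap h) (hne : h ≠ []) :
    (pvHeappop h).1 = pvG h 0 ∧ PVHeap (pvHeappop h).2 ∧
      ((pvHeappop h).1 :: (pvHeappop h).2).Perm h ∧
      (pvHeappop h).2.length = h.length - 1 := by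
  have hlen1 : 1 ≤ h.length := List.length_pos_iff.mpr hne
  by_cases hdl : h.dropLast = []
  · have hl1 : h.length = 1 := by
      have := congrArg List.length hdl
      simp only [List.length_dropLast, List.length_nil] at this
      omega
    obtain ⟨a, rfl⟩ := List.length_eq_one_iff.mp hl1
    refine ⟨rfl, ?_, List.Perm.refl _, rfl⟩
    intro j hj0 hjlen
    simp [pvHeappop] at hjlen
  · have hlen2 : 2 ≤ h.length := by
      have := congrArg List.length (List.dropLast_append_getLast hne)
      simp only [List.length_append, List.length_dropLast, List.length_cons,
        List.length_nil] at this
      rcases Nat.lt_or_ge h.length 2 with hlt | hge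
      · exfalso
        apply hdl
        have : h.dropLast.length = 0 := by simp [List.length_dropLast]; omega
        exact List.length_eq_zero_iff.mp this
      · exact hge
    have hdlen : h.dropLast.length = h.length - 1 := List.length_dropLast
    -- the state after `heap[0] = lastelt`
    have hS : PVS ((h.dropLast).set 0 (pvG h (h.length - 1))) 0 := by
      refine ⟨by simp [hdlen]; omega, ?_, ?_⟩
      · intro j hj0 hjlen hjne hpne
        rw [List.length_set, hdlen] at hjlen
        rw [pvG_set_ne _ 0 j _ (by omega), pvG_set_ne _ 0 ((j-1)/2) _ (fun e => hpne e.symm),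
          pvG_dropLast h j (by omega), pvG_dropLast h ((j-1)/2) (by omega)]
        exact hh j hj0 (by omega)
      · intro c _ _ _ hpos0
        exact absurd hpos0 (by omega)
    obtain ⟨hU1, hU2, hU3, hU4⟩ := pvSiftupLoop_spec _ _ hS
    have hq : PVQ (pvSiftupLoop ((h.dropLast).set 0 (pvG h (h.length - 1))) 0).1
        (pvSiftupLoop ((h.dropLast).set 0 (pvG h (h.length - 1))) 0).2 (pvG h (h.length - 1)) := by
      refine ⟨hU1.1, hU1.2.1, ?_⟩
      intro c hc0 hclen hcpar
      exfalso
      omega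
    obtain ⟨hD1, hD2, hD3⟩ := pvSiftdown_spec _ _ _ hq
    have hperm := (hD2.trans (hU4 (pvG h (h.length - 1)))).trans
      (by rw [List.set_set] : ((h.dropLast.set 0 (pvG h (h.length - 1))).set 0
          (pvG h (h.length - 1))).Perm (h.dropLast.set 0 (pvG h (h.length - 1))))
    -- destructure dropLast
    obtain ⟨hd, t, hht⟩ : ∃ hd t, h.dropLast = hd :: t := by
      rcases hx : h.dropLast with _ | ⟨hd, t⟩
      · exact absurd hx hdl
      · exact ⟨hd, t, rfl⟩
    have hret : pvG h.dropLast 0 = pvG h 0 := pvG_dropLast h 0 (by omega)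
    have hres : pvHeappop h = (pvG h.dropLast 0,
        pvSiftdown (pvSiftupLoop ((h.dropLast).set 0 (pvG h (h.length - 1))) 0).1
          (pvSiftupLoop ((h.dropLast).set 0 (pvG h (h.length - 1))) 0).2
          (pvG h (h.length - 1))) := by
      simp only [pvHeappop, pvSiftup, if_neg hdl]
    rw [hres]
    refine ⟨hret, hD1, ?_, ?_⟩
    · -- ret :: result ~ h
      have hlast : pvG h (h.length - 1) = h.getLast hne := by
        rw [List.getLast_eq_getElem]
        simp [pvG, List.getD_eq_getElem?_getD, List.getElem?_eq_getElem (by omega : h.length - 1 < h.length)]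
      have hsplit : h.dropLast ++ [h.getLast hne] = h := List.dropLast_append_getLast hne
      have h2 : (pvG h.dropLast 0 :: (h.dropLast.set 0 (pvG h (h.length-1)))).Perm h := by
        rw [hht]
        have hhd : pvG h.dropLast 0 = hd := by rw [hht]; rfl
        rw [hhd] at *
        have : (hd :: t).set 0 (pvG h (h.length-1)) = pvG h (h.length-1) :: t := rfl
        rw [this]
        have hp1 : (hd :: pvG h (h.length-1) :: t).Perm (hd :: (t ++ [pvG h (h.length-1)])) := by
          refine List.Perm.cons hd ?_
          have := pv_perm_take_cons_drop t t.length (pvG h (h.length-1))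
          rw [List.take_length, List.drop_length] at this
          exact this.symm
        refine hp1.trans ?_
        rw [hlast]
        have : hd :: (t ++ [h.getLast hne]) = (hd :: t) ++ [h.getLast hne] := rfl
        rw [this, ← hht, hsplit]
      exact (List.Perm.cons _ hperm).trans h2
    · rw [hD3, hU3, List.length_set, hdlen]

theorem pvG_eq_getElem (h : List Int) (j : Nat) (hj : j < h.length) :
    pvG h j = h[j] := by
  simp [pvG, List.getD_eq_getElem?_getD, List.getElem?_eq_getElem hj]

theorem pv_min_eq (h l : List Int) (hh : PVHeap h) (hp : h.Perm l)
    (hs : l.Pairwise (· ≤ ·)) (hne : l ≠ []) : pvG h 0 = l.getD 0 0 := by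
  obtain ⟨m, t, rfl⟩ : ∃ m t, l = m :: t := by
    rcases l with _ | ⟨m, t⟩
    · exact absurd rfl hne
    · exact ⟨m, t, rfl⟩
  have hhl : h.length = t.length + 1 := by simpa using hp.length_eq
  have hhne : 0 < h.length := by omega
  have hmem : pvG h 0 ∈ m :: t := hp.mem_iff.mp (pvG_mem h 0 hhne)
  have hmle : m ≤ pvG h 0 := by
    rcases List.mem_cons.mp hmem with he | ht
    · omega
    · exact (List.pairwise_cons.mp hs).1 _ ht
  have hminh : m ∈ h := hp.mem_iff.mpr (List.mem_cons_self ..)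
  obtain ⟨j, hj, hjm⟩ := List.mem_iff_getElem.mp hminh
  have hle : pvG h 0 ≤ m := by
    have := pvHeap_root_le h hh j hj
    rwa [pvG_eq_getElem h j hj, hjm] at this
  have : pvG h 0 = m := le_antisymm hle hmle
  simpa using this

theorem pv_sorted_getD_mono (l : List Int) (hs : l.Pairwise (· ≤ ·)) (i j : Nat)
    (hij : i ≤ j) (hj : j < l.length) : l.getD i 0 ≤ l.getD j 0 := by
  rcases Nat.eq_or_lt_of_le hij with rfl | hlt
  · exact le_refl _
  · show pvG l i ≤ pvG l j
    rw [pvG_eq_getElem l i (by omega), pvG_eq_getElem l j hj]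
    exact (List.pairwise_iff_getElem.mp hs) i j (by omega) hj hlt

theorem pvBisect_spec (l : List Int) (x : Int) (hs : l.Pairwise (· ≤ ·)) :
    ∀ lo hi, lo ≤ hi → hi ≤ l.length →
    (∀ j, j < lo → l.getD j 0 ≤ x) →
    (∀ j, hi ≤ j → j < l.length → ¬ l.getD j 0 ≤ x) →
    pvBisect l x lo hi ≤ l.length ∧
      (∀ j, j < pvBisect l x lo hi → l.getD j 0 ≤ x) ∧
      (∀ j, pvBisect l x lo hi ≤ j → j < l.length → ¬ l.getD j 0 ≤ x) := by
  intro lo hi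
  fun_induction pvBisect l x lo hi with
  | case1 lo hi hlt hmid ih =>
    intro _ hhi hlow hhigh
    refine ih (by omega) hhi ?_ hhigh
    intro j hj
    exact le_trans (pv_sorted_getD_mono l hs j ((lo + hi) / 2) (by omega) (by omega)) hmid
  | case2 lo hi hlt hmid ih =>
    intro hle hhi hlow hhigh
    refine ih (by omega) (by omega) hlow ?_
    intro j hj hjlen hc
    exact hmid (le_trans (pv_sorted_getD_mono l hs ((lo + hi) / 2) j hj hjlen) hc)
  | case3 lo hi hge =>
    intro hle hhi hlow hhigh
    have : lo = hi := by omega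
    subst this
    exact ⟨by omega, hlow, hhigh⟩

theorem pvInsertAt_sorted (l : List Int) (x : Int) (p : Nat) (hs : l.Pairwise (· ≤ ·))
    (hp : p ≤ l.length)
    (hlow : ∀ j, j < p → l.getD j 0 ≤ x)
    (hhigh : ∀ j, p ≤ j → j < l.length → ¬ l.getD j 0 ≤ x) :
    (l.take p ++ x :: l.drop p).Pairwise (· ≤ ·) := by
  have hmemtake : ∀ a ∈ l.take p, a ≤ x := by
    intro a ha
    obtain ⟨j, hj, hja⟩ := List.mem_iff_getElem.mp ha
    rw [List.getElem_take] at hja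
    have hjp : j < p := by
      have := List.length_take_le p l
      omega
    have hjl : j < l.length := by omega
    rw [← hja, ← pvG_eq_getElem l j hjl]
    exact hlow j hjp
  have hmemdrop : ∀ b ∈ l.drop p, x ≤ b := by
    intro b hb
    obtain ⟨k, hk, hkb⟩ := List.mem_iff_getElem.mp hb
    rw [List.getElem_drop] at hkb
    have hkl : p + k < l.length := by
      have := List.length_drop (l := l) (i := p)
      omega
    rw [← hkb, ← pvG_eq_getElem l (p + k) hkl]
    exact le_of_lt (lt_of_not_ge (hhigh (p + k) (by omega) hkl))
  refine List.pairwise_append.mpr ⟨hs.sublist (List.take_sublist ..), ?_, ?_⟩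
  · refine List.pairwise_cons.mpr ⟨hmemdrop, hs.sublist (List.drop_sublist ..)⟩
  · intro a ha b hb
    rcases List.mem_cons.mp hb with rfl | hbs
    · exact hmemtake a ha
    · exact le_trans (hmemtake a ha) (hmemdrop b hbs)

theorem pvLoop_sim (K : Int) : ∀ (fuel : Nat) (h l : List Int) (count : Int),
    PVHeap h → h.Perm l → l.Pairwise (· ≤ ·) → l ≠ [] →
    (l.length = 1 → K ≤ l.getD 0 0) → l.length ≤ fuel →
    pvLoopA K fuel h count = pvLoopB K fuel l count := by
  intro fuel
  induction fuel with
  | zero =>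
    intro h l count _ _ _ hne _ hlen
    exact absurd (List.length_eq_zero_iff.mp (by omega)) hne
  | succ fuel ih =>
    intro h l count hh hp hs hne h1K hlen
    have hmin : pvG h 0 = l.getD 0 0 := pv_min_eq h l hh hp hs hne
    by_cases hK : l.getD 0 0 < K
    · have hlenl : 2 ≤ l.length := by
        have h1 : 0 < l.length := List.length_pos_iff.mpr hne
        rcases Nat.lt_or_ge l.length 2 with hlt | hge
        · exact absurd hK (not_lt.mpr (h1K (by omega)))
        · exact hge
      obtain ⟨a, b, rest, rfl⟩ : ∃ a b rest, l = a :: b :: rest := by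
        rcases l with _ | ⟨a, _ | ⟨b, rest⟩⟩
        · simp at hlenl
        · simp at hlenl
        · exact ⟨a, b, rest, rfl⟩
      simp only [pvLoopA, pvLoopB]
      rw [hmin, if_pos hK, if_pos hK, if_pos (by simp : 2 ≤ (a :: b :: rest).length)]
      simp only [List.getD_cons_zero, List.getD_cons_succ, List.drop_succ_cons, List.drop_zero]
      have hhne : h ≠ [] := by
        intro hc
        rw [hc] at hp
        simpa using hp.length_eq
      obtain ⟨hA1, hA2, hA3, hA4⟩ := pvHeappop_spec h hh hhne
      have hA1' : (pvHeappop h).1 = a := by rw [hA1, hmin]; rfl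
      have hperm1 : (pvHeappop h).2.Perm (b :: rest) := by
        have := hA3.trans hp
        rw [hA1'] at this
        exact this.cons_inv
      have hne1 : (pvHeappop h).2 ≠ [] := by
        intro hc
        rw [hc] at hperm1
        simpa using hperm1.length_eq
      obtain ⟨hB1, hB2, hB3, hB4⟩ := pvHeappop_spec (pvHeappop h).2 hA2 hne1
      have hstail : (b :: rest).Pairwise (· ≤ ·) := (List.pairwise_cons.mp hs).2
      have hB1' : (pvHeappop (pvHeappop h).2).1 = b := by
        rw [hB1, pv_min_eq (pvHeappop h).2 (b :: rest) hA2 hperm1 hstail (by simp)]; rfl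
      have hperm2 : (pvHeappop (pvHeappop h).2).2.Perm rest := by
        have := hB3.trans hperm1
        rw [hB1'] at this
        exact this.cons_inv
      rw [hA1', hB1']
      obtain ⟨hP1, hP2, hP3⟩ := pvHeappush_spec (pvHeappop (pvHeappop h).2).2 (a + b * 2) hB2
      have hrests : rest.Pairwise (· ≤ ·) := (List.pairwise_cons.mp hstail).2
      obtain ⟨hS1, hS2, hS3⟩ := pvBisect_spec rest (a + b * 2) hrests 0 rest.length
        (by omega) (le_refl _) (by omega) (by omega)
      rw [PySem.List.insert_natCast rest (pvBisect rest (a + b * 2) 0 rest.length) (a + b * 2) hS1]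
      have hpermB : (rest.take (pvBisect rest (a + b * 2) 0 rest.length) ++
          (a + b * 2) :: rest.drop (pvBisect rest (a + b * 2) 0 rest.length)).Perm ((a + b * 2) :: rest) :=
        pv_perm_take_cons_drop rest (pvBisect rest (a + b * 2) 0 rest.length) (a + b * 2)
      have hsortB : (rest.take (pvBisect rest (a + b * 2) 0 rest.length) ++
          (a + b * 2) :: rest.drop (pvBisect rest (a + b * 2) 0 rest.length)).Pairwise (· ≤ ·) :=
        pvInsertAt_sorted rest (a + b * 2) (pvBisect rest (a + b * 2) 0 rest.length)
          hrests hS1 hS2 hS3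
      have hperm3 : (pvHeappush (pvHeappop (pvHeappop h).2).2 (a + b * 2)).Perm
          (rest.take (pvBisect rest (a + b * 2) 0 rest.length) ++
            (a + b * 2) :: rest.drop (pvBisect rest (a + b * 2) 0 rest.length)) :=
        hP2.trans ((hperm2.cons (a + b * 2)).trans hpermB.symm)
      have hneB : (rest.take (pvBisect rest (a + b * 2) 0 rest.length) ++
          (a + b * 2) :: rest.drop (pvBisect rest (a + b * 2) 0 rest.length)) ≠ [] := by simp
      have htop3 := pv_min_eq _ _ hP1 hperm3 hsortB hneB
      rw [hperm3.length_eq, htop3]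
      by_cases hg : (rest.take (pvBisect rest (a + b * 2) 0 rest.length) ++
          (a + b * 2) :: rest.drop (pvBisect rest (a + b * 2) 0 rest.length)).length = 1 ∧
          (rest.take (pvBisect rest (a + b * 2) 0 rest.length) ++
            (a + b * 2) :: rest.drop (pvBisect rest (a + b * 2) 0 rest.length)).getD 0 0 < K
      · rw [if_pos hg, if_pos hg]
      · rw [if_neg hg, if_neg hg]
        refine ih _ _ (count + 1) hP1 hperm3 hsortB hneB ?_ ?_
        · intro h1
          by_contra hKtop
          exact hg ⟨h1, lt_of_not_ge hKtop⟩
        · have hlb : (rest.take (pvBisect rest (a + b * 2) 0 rest.length) ++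
              (a + b * 2) :: rest.drop (pvBisect rest (a + b * 2) 0 rest.length)).length = rest.length + 1 :=
            hpermB.length_eq.trans (by simp)
          simp only [List.length_cons] at hlen
          omega
    · simp only [pvLoopA, pvLoopB]
      rw [hmin, if_neg hK, if_neg hK]

theorem pv_build : ∀ (xs h : List Int), PVHeap h →
    PVHeap (xs.foldl pvHeappush h) ∧ (xs.foldl pvHeappush h).Perm (h ++ xs) := by
  intro xs
  induction xs with
  | nil =>
    intro h hh
    exact ⟨hh, by simp⟩
  | cons x xs ih =>
    intro h hh
    obtain ⟨hp1, hp2, _⟩ := pvHeappush_spec h x hh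
    obtain ⟨H1, H2⟩ := ih (pvHeappush h x) hp1
    refine ⟨by simpa using H1, ?_⟩
    simp only [List.foldl_cons]
    refine H2.trans ((hp2.append_right xs).trans ?_)
    exact List.perm_middle.symm

-- ===== VERDICT (by name: the statement is the Claim_ definition above) =====
theorem solution_spec : Claim_equal_solution := by
  intro sc K hdom hpre
  unfold Spec_solution solution solution_alt
  obtain ⟨hne, h1⟩ := hpre
  obtain ⟨HB1, HB2⟩ := pv_build sc [] (by intro j hj0 hjlen; simp at hjlen)
  have hsp : (PySem.List.sorted sc (fun x => x) false).Perm sc := PySem.List.sorted_perm ..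
  have hsw : (PySem.List.sorted sc (fun x => x) false).Pairwise (· ≤ ·) := by
    have := PySem.List.sorted_pairwise (xs := sc) (key := fun x => x)
    simpa using this
  have hslen : (PySem.List.sorted sc (fun x => x) false).length = sc.length := hsp.length_eq
  refine pvLoop_sim K (sc.length + 1) _ _ 0 HB1 ((HB2.trans (by simp)).trans hsp.symm) hsw ?_ ?_ ?_
  · intro hc
    apply hne
    rw [hc] at hslen
    exact List.length_eq_zero_iff.mp (by simpa using hslen.symm)
  · intro hl1
    rw [hslen] at hl1
    obtain ⟨v, rfl⟩ := List.length_eq_one_iff.mp hl1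
    have : PySem.List.sorted [v] (fun x => x) false = [v] := List.perm_singleton.mp hsp
    rw [this]
    simpa using h1 hl1
  · omega
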